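-- pv_equiv track=rewrite | github.com/IBM/torchlogic | torchlogic/utils/explanations/simplification.py | _phrases_to_lines
-- ===== SOURCE A (Python) =====
-- def _phrases_to_lines(phrases):
--     lines = []
--     cur_level = 0
--
--     for phrase in phrases:
--         if not phrase in ['(', ')']:
--             lines.append((phrase, cur_level))
--         elif phrase == '(':
--             cur_level += 1
--         elif phrase == ')':
--             cur_level -= 1
--     return lines
-- ===== SOURCE B (Python) =====
-- def _phrases_to_lines(phrases):
--     # Divide and conquer: a segment is summarized as (lines-with-local-levels, net paren delta);
--     # two summaries combine by shifting the right half's levels by the left half's delta.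
--     def go(lo, hi):  # summary of phrases[lo:hi]
--         if hi - lo == 0:
--             return [], 0
--         if hi - lo == 1:
--             p = phrases[lo]
--             if p == '(':
--                 return [], 1
--             if p == ')':
--                 return [], -1
--             return [(p, 0)], 0
--         mid = (lo + hi) // 2
--         left_lines, left_delta = go(lo, mid)
--         right_lines, right_delta = go(mid, hi)
--         return (left_lines + [(q, l + left_delta) for (q, l) in right_lines],
--                 left_delta + right_delta)
--     return go(0, len(phrases))[0]
-- ===== Notes on version B (the rewrite author's own statement) =====
-- stated objective: alternative
-- what changed: Replaces A's left-to-right loop with a running depth counter by a divide-and-conquer over index ranges: each half is summarized independently as (lines with local levels, net parenthesis delta) and the summaries are merged by shifting the right half's levels by the left half's delta; no global counter is ever maintained.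
import Mathlib
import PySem

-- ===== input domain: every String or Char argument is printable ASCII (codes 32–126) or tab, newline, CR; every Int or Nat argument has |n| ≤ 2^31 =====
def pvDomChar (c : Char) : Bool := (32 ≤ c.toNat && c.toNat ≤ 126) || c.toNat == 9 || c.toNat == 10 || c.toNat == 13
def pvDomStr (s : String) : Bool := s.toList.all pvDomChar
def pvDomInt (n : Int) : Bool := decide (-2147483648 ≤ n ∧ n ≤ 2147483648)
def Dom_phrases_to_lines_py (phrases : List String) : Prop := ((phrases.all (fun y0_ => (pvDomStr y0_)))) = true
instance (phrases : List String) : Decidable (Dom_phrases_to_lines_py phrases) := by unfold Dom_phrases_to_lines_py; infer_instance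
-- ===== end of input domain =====

-- B replaces A's counter-carrying loop by a divide-and-conquer that summarizes index ranges
-- as (local lines, net paren delta) and merges by level-shifting (alternative decomposition, not faster).

-- ===== PORT A =====
-- A: one loop over phrases carrying (lines, cur_level); non-parens are appended with the current level.
def phrases_to_lines_py (phrases : List String) : List (String × Int) :=
  (phrases.foldl
    (fun (st : List (String × Int) × Int) phrase =>
      if ¬ (phrase = "(" ∨ phrase = ")") then (st.1 ++ [(phrase, st.2)], st.2)
      else if phrase = "(" then (st.1, st.2 + 1)
      else (st.1, st.2 - 1))
    ([], 0)).1

-- ===== PORT B =====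
-- B's helper go(lo, hi): summary of phrases[lo:hi] as (lines with local levels, net delta).
-- phrases[lo] is ported as getD lo "": exact, since every call site keeps lo < phrases.length.
def pvGo (phrases : List String) (lo hi : Nat) : List (String × Int) × Int :=
  if hi - lo = 0 then ([], 0)
  else if hi - lo = 1 then
    let p := phrases.getD lo ""
    if p == "(" then ([], 1)
    else if p == ")" then ([], -1)
    else ([(p, 0)], 0)
  else
    let mid := (lo + hi) / 2
    let l := pvGo phrases lo mid
    let r := pvGo phrases mid hi
    (l.1 ++ r.1.map (fun ql => (ql.1, ql.2 + l.2)), l.2 + r.2)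
termination_by hi - lo
decreasing_by
  · omega
  · omega

def phrases_to_lines_py_alt (phrases : List String) : List (String × Int) :=
  (pvGo phrases 0 phrases.length).1

-- ===== PRECONDITION & SPEC =====
def Spec_phrases_to_lines_py (phrases : List String) (out : List (String × Int)) : Prop := out = phrases_to_lines_py_alt phrases
instance (phrases : List String) (out : List (String × Int)) : Decidable (Spec_phrases_to_lines_py phrases out) := by unfold Spec_phrases_to_lines_py; infer_instance

-- ===== CLAIM (what is proved, stated in full; the proofs are below) =====
def Claim_equal_phrases_to_lines_py : Prop := ∀ (phrases : List String), Dom_phrases_to_lines_py phrases → Spec_phrases_to_lines_py phrases (phrases_to_lines_py phrases)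

-- ===== LEMMAS AND PROOFS =====

-- reference: A's loop body as a structural recursion carrying the level c
def pvG : List String → Int → List (String × Int)
  | [], _ => []
  | p :: r, c =>
    if p = "(" then pvG r (c + 1)
    else if p = ")" then pvG r (c - 1)
    else (p, c) :: pvG r c

def pvDelta : List String → Int
  | [] => 0
  | p :: r => (if p = "(" then 1 else if p = ")" then -1 else 0) + pvDelta r

theorem pvG_shift (ps : List String) : ∀ c : Int,
    pvG ps c = (pvG ps 0).map (fun ql => (ql.1, ql.2 + c)) := by
  induction ps with
  | nil => intro c; simp [pvG]
  | cons p r ih =>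
    intro c
    by_cases h1 : p = "("
    · rw [show pvG (p :: r) c = pvG r (c + 1) from by simp [pvG, h1],
        show pvG (p :: r) 0 = pvG r (0 + 1) from by simp [pvG, h1],
        ih (c + 1), ih (0 + 1), List.map_map]
      apply List.map_congr_left; intro ql _; simp; ring
    · by_cases h2 : p = ")"
      · rw [show pvG (p :: r) c = pvG r (c - 1) from by simp [pvG, h1, h2],
          show pvG (p :: r) 0 = pvG r (0 - 1) from by simp [pvG, h1, h2],
          ih (c - 1), ih (0 - 1), List.map_map]
        apply List.map_congr_left; intro ql _; simp; ring
      · rw [show pvG (p :: r) c = (p, c) :: pvG r c from by simp [pvG, h1, h2],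
          show pvG (p :: r) 0 = (p, 0) :: pvG r 0 from by simp [pvG, h1, h2],
          ih c]
        simp

theorem pvG_append (xs ys : List String) : ∀ c : Int,
    pvG (xs ++ ys) c = pvG xs c ++ pvG ys (c + pvDelta xs) := by
  induction xs with
  | nil => intro c; simp [pvG, pvDelta]
  | cons p r ih =>
    intro c
    by_cases h1 : p = "("
    · rw [show pvG ((p :: r) ++ ys) c = pvG (r ++ ys) (c + 1) from by simp [pvG, h1],
        show pvG (p :: r) c = pvG r (c + 1) from by simp [pvG, h1],
        show pvDelta (p :: r) = 1 + pvDelta r from by simp [pvDelta, h1],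
        ih (c + 1)]
      congr 2; ring
    · by_cases h2 : p = ")"
      · rw [show pvG ((p :: r) ++ ys) c = pvG (r ++ ys) (c - 1) from by simp [pvG, h1, h2],
          show pvG (p :: r) c = pvG r (c - 1) from by simp [pvG, h1, h2],
          show pvDelta (p :: r) = -1 + pvDelta r from by simp [pvDelta, h1, h2],
          ih (c - 1)]
        congr 2; ring
      · rw [show pvG ((p :: r) ++ ys) c = (p, c) :: pvG (r ++ ys) c from by simp [pvG, h1, h2],
          show pvG (p :: r) c = (p, c) :: pvG r c from by simp [pvG, h1, h2],
          show pvDelta (p :: r) = 0 + pvDelta r from by simp [pvDelta, h1, h2],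
          ih c]
        congr 3; ring

theorem pvDelta_append (xs ys : List String) :
    pvDelta (xs ++ ys) = pvDelta xs + pvDelta ys := by
  induction xs with
  | nil => simp [pvDelta]
  | cons p r ih => simp only [List.cons_append, pvDelta, ih]; ring

-- A's fold from state (acc, c) equals acc ++ pvG rest c
theorem pvA_inv (ps : List String) : ∀ (acc : List (String × Int)) (c : Int),
    (ps.foldl
      (fun (st : List (String × Int) × Int) phrase =>
        if ¬ (phrase = "(" ∨ phrase = ")") then (st.1 ++ [(phrase, st.2)], st.2)
        else if phrase = "(" then (st.1, st.2 + 1)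
        else (st.1, st.2 - 1))
      (acc, c)).1 = acc ++ pvG ps c := by
  induction ps with
  | nil => intro acc c; simp [pvG]
  | cons p r ih =>
    intro acc c
    by_cases h1 : p = "("
    · simpa [pvG, h1] using ih acc (c + 1)
    · by_cases h2 : p = ")"
      · simpa [pvG, h1, h2] using ih acc (c - 1)
      · simpa [pvG, h1, h2] using ih (acc ++ [(p, c)]) c

-- pvGo computes (pvG seg 0, pvDelta seg) for the segment phrases[lo:hi]
theorem pvGo_spec (phrases : List String) : ∀ (n lo hi : Nat), hi - lo ≤ n → lo ≤ hi → hi ≤ phrases.length →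
    pvGo phrases lo hi =
      (pvG ((phrases.drop lo).take (hi - lo)) 0, pvDelta ((phrases.drop lo).take (hi - lo))) := by
  intro n
  induction n with
  | zero =>
    intro lo hi hn hle hlen
    have h0 : hi - lo = 0 := by omega
    rw [pvGo]
    simp [h0, pvG, pvDelta]
  | succ n ih =>
    intro lo hi hn hle hlen
    rw [pvGo]
    by_cases h0 : hi - lo = 0
    · simp [h0, pvG, pvDelta]
    · by_cases h1 : hi - lo = 1
      · have hlo : lo < phrases.length := by omega
        have hseg : (phrases.drop lo).take (hi - lo) = [phrases.getD lo ""] := by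
          rw [List.drop_eq_getElem_cons hlo, h1, List.take_succ_cons, List.take_zero,
            List.getD_eq_getElem phrases "" hlo]
        simp only [if_neg h0, if_pos h1, hseg]
        simp only [List.getD_eq_getElem?_getD] at *
        by_cases e1 : phrases[lo]?.getD "" = "("
        · simp [e1, pvG, pvDelta]
        · by_cases e2 : phrases[lo]?.getD "" = ")"
          · simp [e1, e2, pvG, pvDelta]
          · simp [e1, e2, pvG, pvDelta]
      · simp only [if_neg h0, if_neg h1]
        have hm1 : lo ≤ (lo + hi) / 2 := by omega
        have hm2 : (lo + hi) / 2 ≤ hi := by omega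
        rw [ih lo ((lo + hi) / 2) (by omega) hm1 (by omega),
          ih ((lo + hi) / 2) hi (by omega) hm2 hlen]
        have hsplit : (phrases.drop lo).take (hi - lo)
            = (phrases.drop lo).take ((lo + hi) / 2 - lo)
              ++ ((phrases.drop ((lo + hi) / 2)).take (hi - (lo + hi) / 2)) := by
          have he : hi - lo = ((lo + hi) / 2 - lo) + (hi - (lo + hi) / 2) := by omega
          rw [he, List.take_add, List.drop_drop]
          have h2 : lo + ((lo + hi) / 2 - lo) = (lo + hi) / 2 := by omega
          rw [h2]
        rw [hsplit, pvG_append, pvDelta_append]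
        simp
        exact (pvG_shift _ _).symm

-- ===== VERDICT (by name: the statement is the Claim_ definition above) =====
theorem phrases_to_lines_py_spec : Claim_equal_phrases_to_lines_py := by
  intro phrases _
  unfold Spec_phrases_to_lines_py phrases_to_lines_py phrases_to_lines_py_alt
  rw [pvGo_spec phrases phrases.length 0 phrases.length (by omega) (Nat.zero_le _) le_rfl]
  simpa using pvA_inv phrases [] 0
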